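-- pv_equiv track=rewrite | github.com/jkammerland/gentest | scripts/bench_case_scale.py | classify_outputs
-- ===== SOURCE A (Python) =====
-- def classify_outputs(outputs: list[str]) -> str:
--     if any(output.endswith(".artifact_manifest.validated") for output in outputs):
--         return "gentest_manifest_validation"
--     if any(output.endswith(".gentest.h") or output.endswith(".gentest.cpp") for output in outputs):
--         return "gentest_codegen"
--     if any(output.endswith(".o") and "gentest_scale.dir" in output for output in outputs):
--         return "gentest_tu_compile"
--     if any(output.endswith(".o") and "gtest_scale.dir" in output for output in outputs):
--         return "gtest_tu_compile"
--     if any(output.endswith(".o") and "doctest_scale.dir" in output for output in outputs):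
--         return "doctest_tu_compile"
--     if any(output.endswith("gentest_scale") or output.endswith("gentest_scale.exe") for output in outputs):
--         return "gentest_link"
--     if any(output.endswith("gtest_scale") or output.endswith("gtest_scale.exe") for output in outputs):
--         return "gtest_link"
--     if any(output.endswith("doctest_scale") or output.endswith("doctest_scale.exe") for output in outputs):
--         return "doctest_link"
--     return "other"
-- ===== SOURCE B (Python) =====
-- RULES = [
--     (lambda o: o.endswith(".artifact_manifest.validated"), "gentest_manifest_validation"),
--     (lambda o: o.endswith(".gentest.h") or o.endswith(".gentest.cpp"), "gentest_codegen"),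
--     (lambda o: o.endswith(".o") and "gentest_scale.dir" in o, "gentest_tu_compile"),
--     (lambda o: o.endswith(".o") and "gtest_scale.dir" in o, "gtest_tu_compile"),
--     (lambda o: o.endswith(".o") and "doctest_scale.dir" in o, "doctest_tu_compile"),
--     (lambda o: o.endswith("gentest_scale") or o.endswith("gentest_scale.exe"), "gentest_link"),
--     (lambda o: o.endswith("gtest_scale") or o.endswith("gtest_scale.exe"), "gtest_link"),
--     (lambda o: o.endswith("doctest_scale") or o.endswith("doctest_scale.exe"), "doctest_link"),
-- ]
--
--
-- def _first_idx(output):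
--     for i, (pred, _cat) in enumerate(RULES):
--         if pred(output):
--             return i
--     return len(RULES)
--
--
-- def classify_outputs(outputs: list[str]) -> str:
--     best = len(RULES)
--     for output in outputs:
--         best = min(best, _first_idx(output))
--     if best < len(RULES):
--         return RULES[best][1]
--     return "other"
-- ===== Notes on version B (the rewrite author's own statement) =====
-- stated objective: alternative
-- what changed: Replaced A's eight separate any-scans over the output list by a priority table of (predicate, category) rules and ONE pass over the outputs that keeps the minimum matching rule index, then a single table lookup.
import Mathlib
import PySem

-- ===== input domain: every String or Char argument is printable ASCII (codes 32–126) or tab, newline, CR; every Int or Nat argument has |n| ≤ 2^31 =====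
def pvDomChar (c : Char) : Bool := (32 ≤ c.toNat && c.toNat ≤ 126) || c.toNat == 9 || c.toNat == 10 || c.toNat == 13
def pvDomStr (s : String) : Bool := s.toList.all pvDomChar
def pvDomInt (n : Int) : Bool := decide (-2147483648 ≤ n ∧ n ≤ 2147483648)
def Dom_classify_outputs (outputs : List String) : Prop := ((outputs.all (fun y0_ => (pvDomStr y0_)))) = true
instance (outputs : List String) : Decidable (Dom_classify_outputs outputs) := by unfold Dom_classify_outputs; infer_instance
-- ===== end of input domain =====

-- B replaces A's eight separate any-scans by a priority rule table and one pass keeping the minimum matched rule index (alternative decomposition, same asymptotic cost).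

-- ===== PORT A =====
def classify_outputs (outputs : List String) : String :=
  if outputs.any (fun output => PySem.Str.endswith output ".artifact_manifest.validated") then
    "gentest_manifest_validation"
  else if outputs.any (fun output => PySem.Str.endswith output ".gentest.h" || PySem.Str.endswith output ".gentest.cpp") then
    "gentest_codegen"
  else if outputs.any (fun output => PySem.Str.endswith output ".o" && PySem.Str.isIn "gentest_scale.dir" output) then
    "gentest_tu_compile"
  else if outputs.any (fun output => PySem.Str.endswith output ".o" && PySem.Str.isIn "gtest_scale.dir" output) then
    "gtest_tu_compile"
  else if outputs.any (fun output => PySem.Str.endswith output ".o" && PySem.Str.isIn "doctest_scale.dir" output) then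
    "doctest_tu_compile"
  else if outputs.any (fun output => PySem.Str.endswith output "gentest_scale" || PySem.Str.endswith output "gentest_scale.exe") then
    "gentest_link"
  else if outputs.any (fun output => PySem.Str.endswith output "gtest_scale" || PySem.Str.endswith output "gtest_scale.exe") then
    "gtest_link"
  else if outputs.any (fun output => PySem.Str.endswith output "doctest_scale" || PySem.Str.endswith output "doctest_scale.exe") then
    "doctest_link"
  else
    "other"

-- ===== PORT B =====
def pvRules : List ((String → Bool) × String) :=
  [ ((fun o => PySem.Str.endswith o ".artifact_manifest.validated"), "gentest_manifest_validation"),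
    ((fun o => PySem.Str.endswith o ".gentest.h" || PySem.Str.endswith o ".gentest.cpp"), "gentest_codegen"),
    ((fun o => PySem.Str.endswith o ".o" && PySem.Str.isIn "gentest_scale.dir" o), "gentest_tu_compile"),
    ((fun o => PySem.Str.endswith o ".o" && PySem.Str.isIn "gtest_scale.dir" o), "gtest_tu_compile"),
    ((fun o => PySem.Str.endswith o ".o" && PySem.Str.isIn "doctest_scale.dir" o), "doctest_tu_compile"),
    ((fun o => PySem.Str.endswith o "gentest_scale" || PySem.Str.endswith o "gentest_scale.exe"), "gentest_link"),
    ((fun o => PySem.Str.endswith o "gtest_scale" || PySem.Str.endswith o "gtest_scale.exe"), "gtest_link"),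
    ((fun o => PySem.Str.endswith o "doctest_scale" || PySem.Str.endswith o "doctest_scale.exe"), "doctest_link") ]

def pvFirstIdx : List ((String → Bool) × String) → String → Nat
  | [], _ => 0
  | r :: rs, o => if r.1 o then 0 else pvFirstIdx rs o + 1

def classify_outputs_alt (outputs : List String) : String :=
  let best := outputs.foldl (fun b o => min b (pvFirstIdx pvRules o)) pvRules.length
  if best < pvRules.length then (pvRules.map Prod.snd).getD best "other" else "other"

-- ===== PRECONDITION & SPEC =====
def Spec_classify_outputs (outputs : List String) (out : String) : Prop := out = classify_outputs_alt outputs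
instance (outputs : List String) (out : String) : Decidable (Spec_classify_outputs outputs out) := by unfold Spec_classify_outputs; infer_instance

-- ===== CLAIM (what is proved, stated in full; the proofs are below) =====
def Claim_equal_classify_outputs : Prop := ∀ (outputs : List String), Dom_classify_outputs outputs → Spec_classify_outputs outputs (classify_outputs outputs)

-- ===== LEMMAS AND PROOFS =====

-- pvFirstIdx is List.findIdx of the rule predicate applied at o
theorem pvFirstIdx_eq (rs : List ((String → Bool) × String)) (o : String) :
    pvFirstIdx rs o = rs.findIdx (fun r => r.1 o) := by
  induction rs with
  | nil => rfl
  | cons r rs ih => cases h : r.1 o <;> simp [pvFirstIdx, List.findIdx_cons, ih, h]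

-- findIdx over a pointwise-or of two equal-length Bool lists is the min of the findIdxs
theorem findIdx_or_min (bs cs : List Bool) (h : bs.length = cs.length) :
    (List.zipWith (· || ·) bs cs).findIdx id = min (bs.findIdx id) (cs.findIdx id) := by
  induction bs generalizing cs with
  | nil => cases cs <;> simp_all
  | cons b bs ih =>
    cases cs with
    | nil => simp at h
    | cons c cs =>
      simp at h
      cases b <;> cases c <;>
        simp [List.zipWith, List.findIdx_cons, ih cs h, Nat.succ_min_succ]

-- the Bool vector of per-string rule matches
def pvSvec (o : String) : List Bool := pvRules.map (fun r => r.1 o)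
-- the Bool vector of per-list rule matches
def pvVec (l : List String) : List Bool := pvRules.map (fun r => l.any r.1)

theorem pvVec_cons (o : String) (l : List String) :
    pvVec (o :: l) = List.zipWith (· || ·) (pvSvec o) (pvVec l) := by
  simp [pvVec, pvSvec, pvRules, List.any_cons]

theorem pvSvec_findIdx (o : String) : (pvSvec o).findIdx id = pvFirstIdx pvRules o := by
  rw [pvFirstIdx_eq]
  simp [pvSvec, pvRules, List.findIdx_cons]

theorem pvVec_findIdx_le (l : List String) : (pvVec l).findIdx id ≤ 8 := by
  have := List.findIdx_le_length (xs := pvVec l) (p := id)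
  simpa [pvVec, pvRules] using this

-- the fold in B computes findIdx id (pvVec l)
theorem pvFold_eq (l : List String) (a : Nat) (ha : a ≤ 8) :
    l.foldl (fun b o => min b (pvFirstIdx pvRules o)) a = min a ((pvVec l).findIdx id) := by
  induction l generalizing a with
  | nil =>
    have : (pvVec ([] : List String)).findIdx id = 8 := by
      simp [pvVec, pvRules, List.findIdx_cons]
    simp [this]; omega
  | cons o l ih =>
    rw [List.foldl_cons, ih _ (le_trans (Nat.min_le_left _ _) ha),
        pvVec_cons, findIdx_or_min _ _ (by simp [pvSvec, pvVec]), pvSvec_findIdx]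
    omega

-- ===== VERDICT (by name: the statement is the Claim_ definition above) =====
theorem classify_outputs_spec : Claim_equal_classify_outputs := by
  intro outputs _
  unfold Spec_classify_outputs classify_outputs_alt
  rw [show pvRules.length = 8 from rfl, pvFold_eq outputs 8 le_rfl, Nat.min_eq_right (pvVec_findIdx_le outputs)]
  simp only [pvVec, pvRules, List.map_cons, List.map_nil, List.findIdx_cons, id_eq]
  cases h1 : (outputs.any fun o => PySem.Str.endswith o ".artifact_manifest.validated") with
  | true => simp only [classify_outputs, h1, Bool.cond_true, if_true]; rfl
  | false =>
    cases h2 : (outputs.any fun o => PySem.Str.endswith o ".gentest.h" || PySem.Str.endswith o ".gentest.cpp") with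
    | true => simp only [classify_outputs, h1, h2, Bool.cond_true, Bool.cond_false, Bool.false_eq_true, if_true, if_false]; rfl
    | false =>
      cases h3 : (outputs.any fun o => PySem.Str.endswith o ".o" && PySem.Str.isIn "gentest_scale.dir" o) with
      | true => simp only [classify_outputs, h1, h2, h3, Bool.cond_true, Bool.cond_false, Bool.false_eq_true, if_true, if_false]; rfl
      | false =>
        cases h4 : (outputs.any fun o => PySem.Str.endswith o ".o" && PySem.Str.isIn "gtest_scale.dir" o) with
        | true => simp only [classify_outputs, h1, h2, h3, h4, Bool.cond_true, Bool.cond_false, Bool.false_eq_true, if_true, if_false]; rfl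
        | false =>
          cases h5 : (outputs.any fun o => PySem.Str.endswith o ".o" && PySem.Str.isIn "doctest_scale.dir" o) with
          | true => simp only [classify_outputs, h1, h2, h3, h4, h5, Bool.cond_true, Bool.cond_false, Bool.false_eq_true, if_true, if_false]; rfl
          | false =>
            cases h6 : (outputs.any fun o => PySem.Str.endswith o "gentest_scale" || PySem.Str.endswith o "gentest_scale.exe") with
            | true => simp only [classify_outputs, h1, h2, h3, h4, h5, h6, Bool.cond_true, Bool.cond_false, Bool.false_eq_true, if_true, if_false]; rfl
            | false =>
              cases h7 : (outputs.any fun o => PySem.Str.endswith o "gtest_scale" || PySem.Str.endswith o "gtest_scale.exe") with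
              | true => simp only [classify_outputs, h1, h2, h3, h4, h5, h6, h7, Bool.cond_true, Bool.cond_false, Bool.false_eq_true, if_true, if_false]; rfl
              | false =>
                cases h8 : (outputs.any fun o => PySem.Str.endswith o "doctest_scale" || PySem.Str.endswith o "doctest_scale.exe") with
                | true => simp only [classify_outputs, h1, h2, h3, h4, h5, h6, h7, h8, Bool.cond_false, Bool.false_eq_true, if_false]; rfl
                | false =>
                  simp only [classify_outputs, h1, h2, h3, h4, h5, h6, h7, h8, Bool.cond_false, Bool.false_eq_true, if_false]; rfl
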